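-- pv_equiv track=rewrite | github.com/anushreeberlia/loom | services/retrieval.py | filter_by_subtype_diversity
-- ===== SOURCE A (Python) =====
-- ITEM_SUBTYPE_KEYWORDS = {
--     "bottom": ["skirt", "jeans", "trousers", "pants", "shorts", "capris", "leggings", "joggers"],
--     "shoes": ["heels", "flats", "sneakers", "boots", "sandals", "flip flops", "loafers", "pumps", "wedges"],
--     "accessory": ["bag", "handbag", "clutch", "belt", "watch", "earring", "necklace", "pendant", "bracelet", "scarf"],
--     "layer": ["jacket", "blazer", "cardigan", "coat", "sweater", "hoodie", "vest"],
--     "top": ["shirt", "blouse", "t-shirt", "top", "sweater", "tank", "tunic"],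
-- }
--
-- def extract_item_subtype(item_name: str, slot: str) -> str | None:
--     """Extract the subtype of an item from its name."""
--     name_lower = item_name.lower()
--     keywords = ITEM_SUBTYPE_KEYWORDS.get(slot, [])
--
--     for keyword in keywords:
--         if keyword in name_lower:
--             return keyword
--     return None
--
-- def filter_by_subtype_diversity(
--     candidates: list[dict],
--     slot: str,
--     used_subtypes: set[str]
-- ) -> list[dict]:
--     """
--     Reorder candidates to prefer different subtypes than already used.
--     Items with unused subtypes come first.
--     """
--     if not used_subtypes:
--         return candidates
--
--     # Split into preferred (different subtype) and fallback (same subtype)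
--     preferred = []
--     fallback = []
--
--     for c in candidates:
--         subtype = extract_item_subtype(c.get("name", ""), slot)
--         if subtype and subtype in used_subtypes:
--             fallback.append(c)
--         else:
--             preferred.append(c)
--
--     return preferred + fallback
-- ===== SOURCE B (Python) =====
-- ITEM_SUBTYPE_KEYWORDS = {
--     "bottom": ["skirt", "jeans", "trousers", "pants", "shorts", "capris", "leggings", "joggers"],
--     "shoes": ["heels", "flats", "sneakers", "boots", "sandals", "flip flops", "loafers", "pumps", "wedges"],
--     "accessory": ["bag", "handbag", "clutch", "belt", "watch", "earring", "necklace", "pendant", "bracelet", "scarf"],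
--     "layer": ["jacket", "blazer", "cardigan", "coat", "sweater", "hoodie", "vest"],
--     "top": ["shirt", "blouse", "t-shirt", "top", "sweater", "tank", "tunic"],
-- }
--
-- def extract_item_subtype(item_name: str, slot: str) -> str | None:
--     """Extract the subtype of an item from its name."""
--     name_lower = item_name.lower()
--     keywords = ITEM_SUBTYPE_KEYWORDS.get(slot, [])
--     for keyword in keywords:
--         if keyword in name_lower:
--             return keyword
--     return None
--
-- def filter_by_subtype_diversity(candidates, slot, used_subtypes):
--     if not used_subtypes:
--         return candidates
--     return sorted(
--         candidates,
--         key=lambda c: extract_item_subtype(c.get("name", ""), slot) in used_subtypes,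
--     )
-- ===== Notes on version B (the rewrite author's own statement) =====
-- stated objective: idiomatic
-- what changed: A's two-accumulator partition loop (preferred/fallback lists concatenated at the end) is replaced by a single stable sort of the candidates on the boolean key 'subtype in used_subtypes', relying on sort stability to keep each group in original order.
import Mathlib
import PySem

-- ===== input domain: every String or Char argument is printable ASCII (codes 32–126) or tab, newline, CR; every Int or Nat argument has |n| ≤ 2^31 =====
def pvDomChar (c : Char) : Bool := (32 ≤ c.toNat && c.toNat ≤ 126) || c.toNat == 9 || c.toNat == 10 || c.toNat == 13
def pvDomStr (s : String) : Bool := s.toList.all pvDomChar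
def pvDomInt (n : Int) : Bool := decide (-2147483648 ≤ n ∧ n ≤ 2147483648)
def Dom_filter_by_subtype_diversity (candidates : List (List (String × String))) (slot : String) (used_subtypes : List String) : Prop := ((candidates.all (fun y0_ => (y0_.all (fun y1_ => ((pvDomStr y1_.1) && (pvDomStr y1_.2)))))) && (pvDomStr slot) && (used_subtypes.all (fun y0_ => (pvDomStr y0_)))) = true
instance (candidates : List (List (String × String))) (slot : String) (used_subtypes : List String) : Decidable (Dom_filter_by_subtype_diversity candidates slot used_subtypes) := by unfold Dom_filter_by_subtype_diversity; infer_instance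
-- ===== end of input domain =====

-- B replaces A's two-accumulator partition loop with a single stable sort on a boolean key (idiomatic); same return values.

-- ===== PORT A =====
-- ITEM_SUBTYPE_KEYWORDS (module constant)
def pvItemSubtypeKeywords : PySem.Dict String (List String) :=
  PySem.Dict.ofList
    [ ("bottom", ["skirt", "jeans", "trousers", "pants", "shorts", "capris", "leggings", "joggers"])
    , ("shoes", ["heels", "flats", "sneakers", "boots", "sandals", "flip flops", "loafers", "pumps", "wedges"])
    , ("accessory", ["bag", "handbag", "clutch", "belt", "watch", "earring", "necklace", "pendant", "bracelet", "scarf"])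
    , ("layer", ["jacket", "blazer", "cardigan", "coat", "sweater", "hoodie", "vest"])
    , ("top", ["shirt", "blouse", "t-shirt", "top", "sweater", "tank", "tunic"]) ]

-- the 'for keyword in keywords: if keyword in name_lower: return keyword' loop (early return)
def pvFindKeyword (name_lower : String) : List String → Option String
  | [] => none
  | k :: rest => if PySem.Str.isIn k name_lower then some k else pvFindKeyword name_lower rest

def extract_item_subtype (item_name : String) (slot : String) : Option String :=
  let name_lower := PySem.Str.lower item_name
  let keywords := PySem.Dict.getD pvItemSubtypeKeywords slot []
  pvFindKeyword name_lower keywords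

def filter_by_subtype_diversity (candidates : List (List (String × String))) (slot : String) (used_subtypes : List String) : List (List (String × String)) :=
  if used_subtypes = [] then candidates
  else
    -- the for-loop filling 'preferred' and 'fallback'
    let pf := candidates.foldl
      (fun (acc : List (List (String × String)) × List (List (String × String))) c =>
        let subtype := extract_item_subtype ((c.lookup "name").getD "") slot
        if (match subtype with
            | some s => decide (s ≠ "") && used_subtypes.contains s
            | none => false) then (acc.1, acc.2 ++ [c]) else (acc.1 ++ [c], acc.2))
      ([], [])
    pf.1 ++ pf.2

-- ===== PORT B =====
-- the sort key: extract_item_subtype(c.get("name",""), slot) in used_subtypes  (None ∈ set of str is False)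
def pvUsedKey (slot : String) (used_subtypes : List String) (c : List (String × String)) : Bool :=
  match extract_item_subtype ((c.lookup "name").getD "") slot with
  | some s => used_subtypes.contains s
  | none => false

def filter_by_subtype_diversity_alt (candidates : List (List (String × String))) (slot : String) (used_subtypes : List String) : List (List (String × String)) :=
  if used_subtypes = [] then candidates
  else PySem.List.sorted candidates (pvUsedKey slot used_subtypes) false

-- ===== PRECONDITION & SPEC =====
def Spec_filter_by_subtype_diversity (candidates : List (List (String × String))) (slot : String) (used_subtypes : List String) (out : List (List (String × String))) : Prop := out = filter_by_subtype_diversity_alt candidates slot used_subtypes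
instance (candidates : List (List (String × String))) (slot : String) (used_subtypes : List String) (out : List (List (String × String))) : Decidable (Spec_filter_by_subtype_diversity candidates slot used_subtypes out) := by unfold Spec_filter_by_subtype_diversity; infer_instance

-- ===== CLAIM (what is proved, stated in full; the proofs are below) =====
def Claim_equal_filter_by_subtype_diversity : Prop := ∀ (candidates : List (List (String × String))) (slot : String) (used_subtypes : List String), Dom_filter_by_subtype_diversity candidates slot used_subtypes → Spec_filter_by_subtype_diversity candidates slot used_subtypes (filter_by_subtype_diversity candidates slot used_subtypes)

-- ===== LEMMAS AND PROOFS =====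

-- A's loop condition, named for the proofs (defeq to the inline condition in port A)
def pvCondA (slot : String) (used_subtypes : List String) (c : List (String × String)) : Bool :=
  match extract_item_subtype ((c.lookup "name").getD "") slot with
  | some s => decide (s ≠ "") && used_subtypes.contains s
  | none => false

lemma pvFindKeyword_mem (n : String) (l : List String) (s : String)
    (h : pvFindKeyword n l = some s) : s ∈ l := by
  induction l with
  | nil => simp [pvFindKeyword] at h
  | cons k rest ih =>
    simp only [pvFindKeyword] at h
    split at h
    · simp_all
    · exact List.mem_cons_of_mem _ (ih h)

lemma keywords_ne_empty (slot k : String)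
    (h : k ∈ PySem.Dict.getD pvItemSubtypeKeywords slot []) : k ≠ "" := by
  intro hk
  subst hk
  simp only [PySem.Dict.getD, PySem.Dict.get?] at h
  rcases hf : List.find? (fun p => p.1 == slot) pvItemSubtypeKeywords.items with _ | p
  · rw [hf] at h; simp at h
  · rw [hf] at h
    simp only [Option.map_some, Option.getD_some] at h
    have hp := List.mem_of_find?_eq_some hf
    rw [show pvItemSubtypeKeywords.items =
      [ ("bottom", ["skirt", "jeans", "trousers", "pants", "shorts", "capris", "leggings", "joggers"])
      , ("shoes", ["heels", "flats", "sneakers", "boots", "sandals", "flip flops", "loafers", "pumps", "wedges"])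
      , ("accessory", ["bag", "handbag", "clutch", "belt", "watch", "earring", "necklace", "pendant", "bracelet", "scarf"])
      , ("layer", ["jacket", "blazer", "cardigan", "coat", "sweater", "hoodie", "vest"])
      , ("top", ["shirt", "blouse", "t-shirt", "top", "sweater", "tank", "tunic"]) ] from rfl] at hp
    simp only [List.mem_cons, List.not_mem_nil, or_false] at hp
    rcases hp with rfl | rfl | rfl | rfl | rfl <;> revert h <;> decide

lemma extract_ne_empty (n slot s : String) (h : extract_item_subtype n slot = some s) : s ≠ "" := by
  exact keywords_ne_empty slot s (pvFindKeyword_mem _ _ _ h)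

@[simp] lemma pvCondA_eq (slot : String) (u : List String) (c : List (String × String)) :
    pvCondA slot u c = pvUsedKey slot u c := by
  unfold pvCondA pvUsedKey
  cases h : extract_item_subtype ((c.lookup "name").getD "") slot with
  | none => rfl
  | some s => simp [extract_ne_empty _ _ _ h]

lemma partition_fold {β : Type} (cond : β → Bool) (xs F T : List β) :
    xs.foldl (fun acc c => if cond c then (acc.1, acc.2 ++ [c]) else (acc.1 ++ [c], acc.2)) (F, T)
      = (F ++ xs.filter (fun c => !cond c), T ++ xs.filter cond) := by
  induction xs generalizing F T with
  | nil => simp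
  | cons x xs ih =>
    cases h : cond x <;>
      simp [List.foldl_cons, h, ih]

lemma partition_fold0 {β : Type} (cond : β → Bool) (xs : List β) :
    xs.foldl (fun acc c => if cond c then (acc.1, acc.2 ++ [c]) else (acc.1 ++ [c], acc.2)) ([], [])
      = (xs.filter (fun c => !cond c), xs.filter cond) := by
  simpa using partition_fold cond xs [] []

lemma insert_false {β : Type} (cond : β → Bool) (x : β) (F T : List β)
    (hx : cond x = false) (hF : ∀ a ∈ F, cond a = false) (hT : ∀ a ∈ T, cond a = true) :
    PySem.List.insertBy (fun a b => decide (cond a < cond b)) x (F ++ T) = F ++ x :: T := by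
  induction F with
  | nil =>
    cases T with
    | nil => rfl
    | cons t ts =>
      have ht : cond t = true := hT t (by simp)
      simp [PySem.List.insertBy, hx, ht]
  | cons f fs ih =>
    have hf : cond f = false := hF f (by simp)
    simp only [List.cons_append, PySem.List.insertBy, hx, hf]
    simp [ih (fun a ha => hF a (List.mem_cons_of_mem _ ha))]

lemma insert_true {β : Type} (cond : β → Bool) (x : β) (L : List β) (hx : cond x = true) :
    PySem.List.insertBy (fun a b => decide (cond a < cond b)) x L = L ++ [x] := by
  induction L with
  | nil => rfl
  | cons y ys ih =>
    have : decide (cond x < cond y) = false := by cases h : cond y <;> simp [hx]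
    simp [PySem.List.insertBy, this, ih]

lemma fold_sort {β : Type} (cond : β → Bool) (xs F T : List β)
    (hF : ∀ a ∈ F, cond a = false) (hT : ∀ a ∈ T, cond a = true) :
    xs.foldl (fun acc x => PySem.List.insertBy (fun a b => decide (cond a < cond b)) x acc) (F ++ T)
      = (F ++ xs.filter (fun c => !cond c)) ++ (T ++ xs.filter cond) := by
  induction xs generalizing F T with
  | nil => simp
  | cons x xs ih =>
    cases hx : cond x with
    | false =>
      have hF' : ∀ a ∈ F ++ [x], cond a = false := by
        intro a ha
        rcases List.mem_append.1 ha with h | h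
        · exact hF a h
        · simp_all
      rw [List.foldl_cons, insert_false cond x F T hx hF hT,
        show F ++ x :: T = (F ++ [x]) ++ T by simp, ih (F ++ [x]) T hF' hT]
      simp [hx, List.append_assoc]
    | true =>
      have hT' : ∀ a ∈ T ++ [x], cond a = true := by
        intro a ha
        rcases List.mem_append.1 ha with h | h
        · exact hT a h
        · simp_all
      rw [List.foldl_cons, insert_true cond x (F ++ T) hx, List.append_assoc,
        ih F (T ++ [x]) hF hT']
      simp [hx, List.append_assoc]

lemma sorted_partition {β : Type} (cond : β → Bool) (xs : List β) :
    PySem.List.sorted xs cond false = xs.filter (fun c => !cond c) ++ xs.filter cond := by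
  rw [PySem.List.sorted_eq_foldl_insertBy]
  simpa using fold_sort cond xs [] [] (by simp) (by simp)

-- ===== VERDICT (by name: the statement is the Claim_ definition above) =====
theorem filter_by_subtype_diversity_spec : Claim_equal_filter_by_subtype_diversity := by
  intro candidates slot used_subtypes _
  unfold Spec_filter_by_subtype_diversity
  unfold filter_by_subtype_diversity filter_by_subtype_diversity_alt
  by_cases hu : used_subtypes = []
  · simp [hu]
  · simp only [hu, if_false]
    change (List.foldl
        (fun acc c => if pvCondA slot used_subtypes c then (acc.1, acc.2 ++ [c]) else (acc.1 ++ [c], acc.2))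
        ([], []) candidates).1 ++ (List.foldl
        (fun acc c => if pvCondA slot used_subtypes c then (acc.1, acc.2 ++ [c]) else (acc.1 ++ [c], acc.2))
        ([], []) candidates).2 = PySem.List.sorted candidates (pvUsedKey slot used_subtypes) false
    rw [partition_fold0, sorted_partition]
    have h2 : List.filter (pvCondA slot used_subtypes) candidates
        = List.filter (pvUsedKey slot used_subtypes) candidates :=
      List.filter_congr (fun c _ => pvCondA_eq slot used_subtypes c)
    simp [pvCondA_eq, h2]
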